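-- pv_equiv track=rewrite | github.com/Dchamel/python_learning | AdventOfCode/2015/task5.py | check_3_vowels
-- ===== SOURCE A (Python) =====
-- def check_3_vowels(string4check: str) -> bool:
--     '''Check for 3 vowels. Out - true/false'''
--     VOWELS = 'aeiou'
--     count = 0
--     for letter in VOWELS:
--         if letter in string4check:
--             letter_quantity = string4check.count(letter)
--             if letter_quantity > 1:
--                 count += letter_quantity
--             else:
--                 count += 1
--     return count >= 3
-- ===== SOURCE B (Python) =====
-- def check_3_vowels(string4check: str) -> bool:
--     '''Check for 3 vowels. Out - true/false'''
--     count = 0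
--     for ch in string4check:
--         if ch in 'aeiou':
--             count += 1
--     return count >= 3
-- ===== Notes on version B (the rewrite author's own statement) =====
-- stated objective: simpler
-- what changed: B replaces A's five repeated scans (a membership test plus a .count pass per vowel letter) with a single pass over the string that increments one counter for every vowel character.
import Mathlib
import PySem

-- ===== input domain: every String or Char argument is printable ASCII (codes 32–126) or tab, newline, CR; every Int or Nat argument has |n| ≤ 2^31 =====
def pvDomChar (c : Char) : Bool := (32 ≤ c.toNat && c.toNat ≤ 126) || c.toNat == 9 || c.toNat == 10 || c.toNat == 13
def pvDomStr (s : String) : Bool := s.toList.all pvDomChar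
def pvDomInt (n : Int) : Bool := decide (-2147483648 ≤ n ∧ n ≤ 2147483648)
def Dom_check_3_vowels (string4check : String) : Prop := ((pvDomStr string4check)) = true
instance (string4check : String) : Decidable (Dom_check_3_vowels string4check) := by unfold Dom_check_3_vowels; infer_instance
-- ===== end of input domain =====

-- B replaces A's five per-vowel scans with one single pass over the string (simpler).


-- ===== PORT A =====
-- for letter in VOWELS: if letter in s: q = s.count(letter); count += q if q > 1 else 1
def check_3_vowels (string4check : String) : Bool :=
  let VOWELS : String := "aeiou"
  let count : Int :=
    VOWELS.toList.foldl
      (fun count letter =>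
        if PySem.Str.isIn (String.ofList [letter]) string4check then
          let letter_quantity : Int := (PySem.Str.count string4check (String.ofList [letter]) : Int)
          if letter_quantity > 1 then count + letter_quantity else count + 1
        else count)
      0
  decide (count ≥ 3)

-- ===== PORT B =====
-- single pass: count = 0; for ch in s: if ch in 'aeiou': count += 1; return count >= 3
def check_3_vowels_alt (string4check : String) : Bool :=
  let count : Int :=
    string4check.toList.foldl
      (fun count ch => if PySem.Str.isIn (String.ofList [ch]) "aeiou" then count + 1 else count)
      0
  decide (count ≥ 3)

-- ===== PRECONDITION & SPEC =====
def Spec_check_3_vowels (string4check : String) (out : Bool) : Prop := out = check_3_vowels_alt string4check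
instance (string4check : String) (out : Bool) : Decidable (Spec_check_3_vowels string4check out) := by unfold Spec_check_3_vowels; infer_instance

-- ===== CLAIM (what is proved, stated in full; the proofs are below) =====
def Claim_equal_check_3_vowels : Prop := ∀ (string4check : String), Dom_check_3_vowels string4check → Spec_check_3_vowels string4check (check_3_vowels string4check)

-- ===== LEMMAS AND PROOFS =====

-- 'c in s' for a single character is exactly list membership
theorem isIn_singleton (c : Char) (l : List Char) :
    PySem.Chars.isIn [c] l = l.contains c := by
  by_cases h : c ∈ l
  · rw [(PySem.Chars.isIn_iff_infix [c] l).2 (by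
      obtain ⟨pre, suf, rfl⟩ := List.append_of_mem h
      exact ⟨pre, suf, by simp⟩)]
    simp [h]
  · have hn : ¬ ([c] <:+: l) := fun hinf => h (hinf.subset (by simp))
    rw [(PySem.Chars.isIn_eq_false_iff [c] l).2 hn]
    simp [h]

-- single-char 'sub in s' through the Str wrapper
theorem strIsIn_singleton (c : Char) (s : String) :
    PySem.Str.isIn (String.ofList [c]) s = s.toList.contains c := by
  rw [PySem.Str.isIn_eq, String.toList_ofList, isIn_singleton]

-- s.count(c) for a single character is list count
theorem countgo_singleton (c : Char) :
    ∀ (l : List Char) (fuel acc : Nat), l.length ≤ fuel →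
      PySem.Chars.count.go [c] fuel l acc = acc + l.count c := by
  intro l
  induction l with
  | nil => intro fuel acc h; cases fuel <;> simp [PySem.Chars.count.go]
  | cons h t ih =>
    intro fuel acc hle
    cases fuel with
    | zero => simp at hle
    | succ n =>
      simp only [List.length_cons, Nat.succ_le_succ_iff] at hle
      by_cases hc : h = c
      · subst hc
        have hp : [h].isPrefixOf (h :: t) = true := by simp [List.isPrefixOf]
        simp only [PySem.Chars.count.go, hp, if_true, List.length_cons, List.drop_succ_cons,
          List.length_nil, List.drop_zero]
        rw [ih n (acc + 1) hle, List.count_cons]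
        simp; omega
      · have hp : [c].isPrefixOf (h :: t) = false := by
          simp [List.isPrefixOf]; exact fun h' => hc h'.symm
        simp only [PySem.Chars.count.go, hp, if_false, Bool.false_eq_true]
        rw [ih n acc hle, List.count_cons]
        simp [hc]

theorem count_singleton (s : String) (c : Char) :
    PySem.Str.count s (String.ofList [c]) = s.toList.count c := by
  rw [PySem.Str.count_eq, String.toList_ofList]
  rw [PySem.Chars.count]
  simp only [List.isEmpty_cons, Bool.false_eq_true, if_false]
  rw [countgo_singleton c s.toList s.toList.length 0 le_rfl]
  simp

-- A's per-letter contribution is exactly the count of that letter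
theorem stepA (s : String) (acc : Int) (c : Char) :
    (if PySem.Str.isIn (String.ofList [c]) s then
      let q : Int := (PySem.Str.count s (String.ofList [c]) : Int)
      if q > 1 then acc + q else acc + 1
     else acc) = acc + (s.toList.count c : Int) := by
  rw [strIsIn_singleton, count_singleton]
  by_cases h : c ∈ s.toList
  · have h1 : 1 ≤ s.toList.count c := List.one_le_count_iff.2 h
    simp only [List.contains_eq_mem, h, decide_true, if_true]
    by_cases h2 : (s.toList.count c : Int) > 1
    · simp [h2]
    · have : s.toList.count c = 1 := by omega
      simp [this]
  · have : s.toList.count c = 0 := List.count_eq_zero.2 h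
    simp [List.contains_eq_mem, h, this]

-- the single-pass vowel count equals the sum of the five per-letter counts
theorem countP_vowels (l : List Char) :
    l.countP (fun ch => (['a','e','i','o','u'] : List Char).contains ch) =
      l.count 'a' + l.count 'e' + l.count 'i' + l.count 'o' + l.count 'u' := by
  induction l with
  | nil => simp
  | cons h t ih =>
    simp only [List.countP_cons, List.count_cons, ih]
    by_cases ha : h = 'a'
    · subst ha; simp; omega
    by_cases he : h = 'e'
    · subst he; simp; omega
    by_cases hi : h = 'i'
    · subst hi; simp; omega
    by_cases ho : h = 'o'
    · subst ho; simp; omega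
    by_cases hu : h = 'u'
    · subst hu; simp; omega
    simp [ha, he, hi, ho, hu]

theorem foldB (s : String) :
    s.toList.foldl
      (fun count ch => if PySem.Str.isIn (String.ofList [ch]) "aeiou" then count + 1 else count)
      (0 : Int) =
    ((s.toList.count 'a' + s.toList.count 'e' + s.toList.count 'i'
      + s.toList.count 'o' + s.toList.count 'u' : Nat) : Int) := by
  have hpred : ∀ ch, PySem.Str.isIn (String.ofList [ch]) "aeiou" =
      (['a','e','i','o','u'] : List Char).contains ch := by
    intro ch
    rw [strIsIn_singleton]
    rfl
  rw [PySem.List.foldl_if_add_one]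
  rw [List.countP_congr (fun x _ => by rw [hpred])]
  rw [countP_vowels]
  simp

-- ===== VERDICT (by name: the statement is the Claim_ definition above) =====
theorem check_3_vowels_spec : Claim_equal_check_3_vowels := by
  intro s _
  unfold Spec_check_3_vowels check_3_vowels check_3_vowels_alt
  have hV : ("aeiou" : String).toList = ['a','e','i','o','u'] := rfl
  simp only [hV, List.foldl_cons, List.foldl_nil, stepA, foldB]
  push_cast
  ring_nf
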